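-- pv_equiv track=rewrite | github.com/Yushu/InterviewPrep | CodeSignal_CompanyChallenges/Wizeline_RoadMap.py | solution
-- ===== SOURCE A (Python) =====
-- def solution(tasks, queries):
--     output = []
--     for q in queries:
--         name = q[0]
--         date = q[1]
--         lst = []
--         for task in tasks:
--             t, start_dt, end_dt, *members = task
--             if date >= start_dt and date <= end_dt and name in members:
--                 lst.append((end_dt, t))
--         output.append([x[1] for x in sorted(lst)])
--     return output
-- ===== SOURCE B (Python) =====
-- def solution(tasks, queries):
--     # Sort a copy of the tasks once by the compound key (end_date, task_name);
--     # each query then needs only one linear pass, no per-query sort.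
--     ordered = sorted(tasks, key=lambda tk: (tk[2], tk[0]))
--     output = []
--     for q in queries:
--         name = q[0]
--         date = q[1]
--         output.append([tk[0] for tk in ordered
--                        if tk[1] <= date <= tk[2] and name in tk[3:]])
--     return output
-- ===== Notes on version B (the rewrite author's own statement) =====
-- stated objective: alternative
-- what changed: Instead of filtering and then sorting the matches separately for every query, B sorts a copy of the task list once by the same compound key (end_date, task_name) and answers each query with a single linear filter pass over the pre-sorted list, so no per-query sort remains.
-- outside the precondition, e.g. on solution([['b'], ['', '', ''], ['0x a 1'], ['zcx 90191', '']], []): A returns [], B raises IndexError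
import Mathlib
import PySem

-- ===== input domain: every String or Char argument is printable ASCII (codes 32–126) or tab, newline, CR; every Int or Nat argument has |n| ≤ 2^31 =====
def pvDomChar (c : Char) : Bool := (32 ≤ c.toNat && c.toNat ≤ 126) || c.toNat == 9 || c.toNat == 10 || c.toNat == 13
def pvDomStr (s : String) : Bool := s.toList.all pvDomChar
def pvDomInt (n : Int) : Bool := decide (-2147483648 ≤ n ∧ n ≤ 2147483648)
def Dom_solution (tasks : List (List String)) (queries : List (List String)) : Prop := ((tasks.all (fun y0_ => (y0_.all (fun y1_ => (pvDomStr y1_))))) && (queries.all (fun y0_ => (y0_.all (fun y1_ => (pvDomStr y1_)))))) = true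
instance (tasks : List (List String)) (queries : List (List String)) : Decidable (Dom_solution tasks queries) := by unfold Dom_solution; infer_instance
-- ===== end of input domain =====

-- B sorts the task list once by the compound key (end_date, task_name) and answers each
-- query with a single filter pass, instead of A's per-query filter-then-sort.

-- ===== PORT A =====
def solution (tasks : List (List String)) (queries : List (List String)) : List (List String) :=
  queries.foldl (fun output q =>
    let name := PySem.List.pyGetD q 0 ""
    let date := PySem.List.pyGetD q 1 ""
    let lst := tasks.foldl (fun lst task =>
      let t := PySem.List.pyGetD task 0 ""
      let start_dt := PySem.List.pyGetD task 1 ""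
      let end_dt := PySem.List.pyGetD task 2 ""
      let members := PySem.List.slice task (some 3) none
      if (decide (start_dt ≤ date) && decide (date ≤ end_dt)) && members.contains name
      then lst ++ [(end_dt, t)] else lst) ([] : List (String × String))
    output ++ [(PySem.List.sorted2 lst Prod.fst Prod.snd).map Prod.snd]) []

-- ===== PORT B =====
def solution_alt (tasks : List (List String)) (queries : List (List String)) : List (List String) :=
  let ordered := PySem.List.sorted2 tasks
    (fun tk => PySem.List.pyGetD tk 2 "") (fun tk => PySem.List.pyGetD tk 0 "")
  queries.map (fun q =>
    let name := PySem.List.pyGetD q 0 ""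
    let date := PySem.List.pyGetD q 1 ""
    (ordered.filter (fun tk =>
        (decide (PySem.List.pyGetD tk 1 "" ≤ date) && decide (date ≤ PySem.List.pyGetD tk 2 "")) &&
        (PySem.List.slice tk (some 3) none).contains name)).map
      (fun tk => PySem.List.pyGetD tk 0 ""))

-- ===== PRECONDITION & SPEC =====
-- Pre_ excludes queries shorter than 2 and tasks shorter than 3 entries: A raises there
-- (IndexError / unpacking ValueError) whenever queries is non-empty, and with an empty query
-- list A returns [] without looking at the tasks while B's upfront sort indexes tk[2] and raises.
def Pre_solution (tasks : List (List String)) (queries : List (List String)) : Prop :=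
  (∀ tk ∈ tasks, 3 ≤ tk.length) ∧ (∀ q ∈ queries, 2 ≤ q.length)
instance (tasks : List (List String)) (queries : List (List String)) : Decidable (Pre_solution tasks queries) := by unfold Pre_solution; infer_instance
def pvWitness_solution : List (List String) × List (List String) :=
  ([["t1", "2020-01-01", "2020-01-31", "alice"]], [["alice", "2020-01-15"]])

def Spec_solution (tasks : List (List String)) (queries : List (List String)) (out : List (List String)) : Prop := out = solution_alt tasks queries
instance (tasks : List (List String)) (queries : List (List String)) (out : List (List String)) : Decidable (Spec_solution tasks queries out) := by unfold Spec_solution; infer_instance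

-- ===== CLAIM (what is proved, stated in full; the proofs are below) =====
def Claim_equal_solution : Prop := ∀ (tasks : List (List String)) (queries : List (List String)), Dom_solution tasks queries → Pre_solution tasks queries → Spec_solution tasks queries (solution tasks queries)

-- ===== LEMMAS AND PROOFS =====

-- inserting an element that sorts before the whole list just conses it
theorem pv_insertBy_eq_cons {α : Type} (before : α → α → Bool) (x : α) (l : List α)
    (h : ∀ z ∈ l, before x z = true) : PySem.List.insertBy before x l = x :: l := by
  cases l with
  | nil => rfl
  | cons y ys => simp [PySem.List.insertBy, h y (by simp)]

-- the insertion step preserves the "no later element sorts strictly before an earlier one" invariant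
theorem pv_pairwise_insertBy {α : Type} (before : α → α → Bool) (x : α) (ys : List α)
    (hasym : ∀ a b, before a b = true → before b a = false)
    (htrans : ∀ a b c, before a b = true → before b c = true → before a c = true)
    (hys : ys.Pairwise (fun a b => before b a = false)) :
    (PySem.List.insertBy before x ys).Pairwise (fun a b => before b a = false) := by
  induction ys with
  | nil => simp [PySem.List.insertBy]
  | cons y ys ih =>
    rcases List.pairwise_cons.mp hys with ⟨hy, hys'⟩
    by_cases hxy : before x y = true
    · simp only [PySem.List.insertBy, hxy, if_true]
      refine List.pairwise_cons.mpr ⟨?_, hys⟩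
      intro z hz
      rcases List.mem_cons.mp hz with rfl | hz
      · exact hasym _ _ hxy
      · by_contra hzx
        have hzx' : before z x = true := by
          cases h : before z x
          · exact absurd h hzx
          · rfl
        have := htrans _ _ _ hzx' hxy
        have := hy z hz
        simp_all
    · have hxy' : before x y = false := by
        cases h : before x y
        · rfl
        · exact absurd h hxy
      simp only [PySem.List.insertBy, hxy', Bool.false_eq_true, if_false]
      refine List.pairwise_cons.mpr ⟨?_, ih hys'⟩
      intro w hw
      rcases (PySem.List.mem_insertBy before x w ys).mp hw with rfl | hw
      · exact hxy'
      · exact hy w hw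

-- filtering commutes with a single stable insertion into a sorted accumulator
theorem pv_filter_insertBy {α : Type} (before : α → α → Bool) (p : α → Bool) (x : α) (ys : List α)
    (hfwd : ∀ a b c, before a b = true → before c b = false → before a c = true)
    (hys : ys.Pairwise (fun a b => before b a = false)) :
    (PySem.List.insertBy before x ys).filter p
      = if p x then PySem.List.insertBy before x (ys.filter p) else ys.filter p := by
  induction ys with
  | nil => cases hpx : p x <;> simp [PySem.List.insertBy, List.filter, hpx]
  | cons y ys ih =>
    rcases List.pairwise_cons.mp hys with ⟨hy, hys'⟩
    by_cases hxy : before x y = true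
    · simp only [PySem.List.insertBy, hxy, if_true]
      cases hpx : p x with
      | false => simp [List.filter_cons, hpx]
      | true =>
        cases hpy : p y with
        | true => simp [hpx, hpy, PySem.List.insertBy, hxy]
        | false =>
          simp only [List.filter_cons, hpx, hpy, if_true]
          symm
          apply pv_insertBy_eq_cons
          intro z hz
          have hz' : z ∈ ys := (List.mem_filter.mp hz).1
          exact hfwd x y z hxy (hy z hz')
    · have hxy' : before x y = false := by
        cases h : before x y
        · rfl
        · exact absurd h hxy
      simp only [PySem.List.insertBy, hxy', Bool.false_eq_true, if_false]
      cases hpy : p y with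
      | true =>
        cases hpx : p x with
        | true =>
          simp [List.filter_cons, hpy, hpx, PySem.List.insertBy, hxy', ih hys']
        | false =>
          simp [hpy, hpx, ih hys']
      | false =>
        cases hpx : p x with
        | true => simp [hpy, hpx, ih hys']
        | false => simp [hpy, hpx, ih hys']

-- filtering commutes with the whole insertion-sort fold
theorem pv_filter_foldl {α : Type} (before : α → α → Bool) (p : α → Bool)
    (hfwd : ∀ a b c, before a b = true → before c b = false → before a c = true)
    (hasym : ∀ a b, before a b = true → before b a = false)
    (htrans : ∀ a b c, before a b = true → before b c = true → before a c = true) :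
    ∀ (xs acc : List α), acc.Pairwise (fun a b => before b a = false) →
    (xs.foldl (fun a x => PySem.List.insertBy before x a) acc).filter p
      = (xs.filter p).foldl (fun a x => PySem.List.insertBy before x a) (acc.filter p) := by
  intro xs
  induction xs with
  | nil => intro acc _; rfl
  | cons x xs ih =>
    intro acc hacc
    have h1 := ih (PySem.List.insertBy before x acc)
      (pv_pairwise_insertBy before x acc hasym htrans hacc)
    cases hpx : p x with
    | true =>
      simp only [List.foldl_cons, h1, pv_filter_insertBy before p x acc hfwd hacc, hpx,
        List.filter_cons, if_true]
    | false =>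
      simp only [List.foldl_cons, h1, pv_filter_insertBy before p x acc hfwd hacc, hpx,
        List.filter_cons, Bool.false_eq_true, if_false]

-- mapping through one insertion, when the comparison only looks at the image
theorem pv_map_insertBy {α β : Type} (before : α → α → Bool) (before' : β → β → Bool) (f : α → β)
    (hcomp : ∀ a b, before' (f a) (f b) = before a b) (x : α) (ys : List α) :
    (PySem.List.insertBy before x ys).map f = PySem.List.insertBy before' (f x) (ys.map f) := by
  induction ys with
  | nil => rfl
  | cons y ys ih =>
    cases h : before x y with
    | true => simp [PySem.List.insertBy, h, hcomp]
    | false => simp [PySem.List.insertBy, h, hcomp, ih]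

-- mapping through the whole insertion-sort fold
theorem pv_map_foldl {α β : Type} (before : α → α → Bool) (before' : β → β → Bool) (f : α → β)
    (hcomp : ∀ a b, before' (f a) (f b) = before a b) :
    ∀ (xs acc : List α),
    (xs.foldl (fun a x => PySem.List.insertBy before x a) acc).map f
      = (xs.map f).foldl (fun a x => PySem.List.insertBy before' x a) (acc.map f) := by
  intro xs
  induction xs with
  | nil => intro acc; rfl
  | cons x xs ih =>
    intro acc
    simp only [List.foldl_cons, List.map_cons, ih, pv_map_insertBy before before' f hcomp]

-- the three order facts for the lexicographic two-key comparison
theorem pv_lexb_iff {κ₁ κ₂ : Type} [LinearOrder κ₁] [LinearOrder κ₂] (x1 y1 : κ₁) (x2 y2 : κ₂) :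
    (decide (x1 < y1) || !decide (y1 < x1) && decide (x2 < y2)) = true ↔
      (x1 < y1 ∨ (x1 ≤ y1 ∧ x2 < y2)) := by
  simp [not_lt]

theorem pv_lex_fwd {α : Type} {κ₁ κ₂ : Type} [LinearOrder κ₁] [LinearOrder κ₂]
    (k1 : α → κ₁) (k2 : α → κ₂) (a b c : α)
    (h1 : (decide (k1 a < k1 b) || !decide (k1 b < k1 a) && decide (k2 a < k2 b)) = true)
    (h2 : (decide (k1 c < k1 b) || !decide (k1 b < k1 c) && decide (k2 c < k2 b)) = false) :
    (decide (k1 a < k1 c) || !decide (k1 c < k1 a) && decide (k2 a < k2 c)) = true := by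
  rw [pv_lexb_iff] at h1 ⊢
  have h2' := (not_congr (pv_lexb_iff (k1 c) (k1 b) (k2 c) (k2 b))).mp (by simp [h2])
  rcases not_or.mp h2' with ⟨hcb, hcb2⟩
  have hbc : k1 b ≤ k1 c := not_lt.mp hcb
  rcases h1 with h | ⟨hab, h2ab⟩
  · exact Or.inl (lt_of_lt_of_le h hbc)
  · rcases lt_or_ge (k1 b) (k1 c) with h | h
    · exact Or.inl (lt_of_le_of_lt hab h)
    · have : ¬ k2 c < k2 b := fun hk => hcb2 ⟨h, hk⟩
      exact Or.inr ⟨le_trans hab hbc, lt_of_lt_of_le h2ab (not_lt.mp this)⟩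

theorem pv_lex_asym {α : Type} {κ₁ κ₂ : Type} [LinearOrder κ₁] [LinearOrder κ₂]
    (k1 : α → κ₁) (k2 : α → κ₂) (a b : α)
    (h : (decide (k1 a < k1 b) || !decide (k1 b < k1 a) && decide (k2 a < k2 b)) = true) :
    (decide (k1 b < k1 a) || !decide (k1 a < k1 b) && decide (k2 b < k2 a)) = false := by
  rw [pv_lexb_iff] at h
  rw [Bool.eq_false_iff, Ne, pv_lexb_iff, not_or, not_and']
  rcases h with h | ⟨hab, h2⟩
  · exact ⟨asymm h, fun _ hba => absurd h (not_lt.mpr hba)⟩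
  · exact ⟨not_lt.mpr hab, fun hk _ => absurd h2 (asymm hk)⟩

theorem pv_lex_trans {α : Type} {κ₁ κ₂ : Type} [LinearOrder κ₁] [LinearOrder κ₂]
    (k1 : α → κ₁) (k2 : α → κ₂) (a b c : α)
    (h1 : (decide (k1 a < k1 b) || !decide (k1 b < k1 a) && decide (k2 a < k2 b)) = true)
    (h2 : (decide (k1 b < k1 c) || !decide (k1 c < k1 b) && decide (k2 b < k2 c)) = true) :
    (decide (k1 a < k1 c) || !decide (k1 c < k1 a) && decide (k2 a < k2 c)) = true := by
  rw [pv_lexb_iff] at h1 h2 ⊢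
  rcases h1 with h | ⟨hab, h2ab⟩ <;> rcases h2 with g | ⟨hbc, h2bc⟩
  · exact Or.inl (lt_trans h g)
  · exact Or.inl (lt_of_lt_of_le h hbc)
  · exact Or.inl (lt_of_le_of_lt hab g)
  · exact Or.inr ⟨le_trans hab hbc, lt_trans h2ab h2bc⟩

-- per-query core: sorting the filtered key pairs = filtering the globally key-sorted tasks
theorem pv_query {α : Type} (p : α → Bool) (k1 k2 : α → String) (tasks : List α) :
    (PySem.List.sorted2 ((tasks.filter p).map (fun tk => (k1 tk, k2 tk)))
        Prod.fst Prod.snd).map Prod.snd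
      = ((PySem.List.sorted2 tasks k1 k2).filter p).map k2 := by
  simp only [PySem.List.sorted2, if_neg (by decide : ¬ (false = true))]
  have hmap := pv_map_foldl
    (fun a b => decide (k1 a < k1 b) || !decide (k1 b < k1 a) && decide (k2 a < k2 b))
    (fun a b => decide (a.1 < b.1) || !decide (b.1 < a.1) && decide (a.2 < b.2))
    (fun tk => (k1 tk, k2 tk)) (fun _ _ => rfl) (tasks.filter p) []
  have hfilt := pv_filter_foldl
    (fun a b => decide (k1 a < k1 b) || !decide (k1 b < k1 a) && decide (k2 a < k2 b)) p
    (pv_lex_fwd k1 k2) (pv_lex_asym k1 k2) (pv_lex_trans k1 k2) tasks [] List.Pairwise.nil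
  simp only [List.map_nil] at hmap
  simp only [List.filter_nil] at hfilt
  rw [hfilt, ← hmap, List.map_map]
  rfl

-- ===== VERDICT (by name: the statement is the Claim_ definition above) =====
theorem solution_spec : Claim_equal_solution := by
  intro tasks queries _ _
  unfold Spec_solution solution solution_alt
  rw [PySem.List.foldl_append_singleton_eq_map
    (fun q =>
      (PySem.List.sorted2 (tasks.foldl (fun lst task =>
        if (decide (PySem.List.pyGetD task 1 "" ≤ PySem.List.pyGetD q 1 "") &&
            decide (PySem.List.pyGetD q 1 "" ≤ PySem.List.pyGetD task 2 "")) &&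
            (PySem.List.slice task (some 3) none).contains (PySem.List.pyGetD q 0 "")
        then lst ++ [(PySem.List.pyGetD task 2 "", PySem.List.pyGetD task 0 "")] else lst) [])
        Prod.fst Prod.snd).map Prod.snd) queries []]
  simp only [List.nil_append]
  apply List.map_congr_left
  intro q _
  rw [PySem.List.foldl_append_if
    (fun task =>
      (decide (PySem.List.pyGetD task 1 "" ≤ PySem.List.pyGetD q 1 "") &&
       decide (PySem.List.pyGetD q 1 "" ≤ PySem.List.pyGetD task 2 "")) &&
       (PySem.List.slice task (some 3) none).contains (PySem.List.pyGetD q 0 ""))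
    (fun task => (PySem.List.pyGetD task 2 "", PySem.List.pyGetD task 0 "")) tasks []]
  simp only [List.nil_append]
  exact pv_query _ (fun tk => PySem.List.pyGetD tk 2 "") (fun tk => PySem.List.pyGetD tk 0 "") tasks
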